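-- pv_equiv track=rewrite | github.com/harishankarn04/Openlab_B210_SDR | gr-custom_gfsk/python/custom_gfsk/custom_gfsk_lib.py | _slow_hamming_8_4_encode
-- ===== SOURCE A (Python) =====
-- def _slow_hamming_8_4_encode(nibble):
--     d = [(nibble >> i) & 1 for i in range(4)][::-1]
--     p1 = d[0] ^ d[1] ^ d[3]
--     p2 = d[0] ^ d[2] ^ d[3]
--     p3 = d[1] ^ d[2] ^ d[3]
--     bits = [p1, p2, d[0], p3, d[1], d[2], d[3]]
--     p0 = sum(bits) % 2
--     return (p0 << 7) | (p1 << 6) | (p2 << 5) | (d[0] << 4) | (p3 << 3) | (d[1] << 2) | (d[2] << 1) | d[3]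
-- ===== SOURCE B (Python) =====
-- # Hamming(8,4): one precomputed 16-entry codeword table instead of per-call bit arithmetic.
-- _TABLE = (0, 105, 170, 195, 204, 165, 102, 15,
--           240, 153, 90, 51, 60, 85, 150, 255)
--
-- def _slow_hamming_8_4_encode(nibble):
--     return _TABLE[nibble & 0xF]
-- ===== Notes on version B (the rewrite author's own statement) =====
-- stated objective: simpler
-- what changed: Replaces the per-call bit extraction, parity computation and bit reassembly with a single indexed lookup into a precomputed 16-entry codeword table, indexed by nibble & 0xF.
import Mathlib
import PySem

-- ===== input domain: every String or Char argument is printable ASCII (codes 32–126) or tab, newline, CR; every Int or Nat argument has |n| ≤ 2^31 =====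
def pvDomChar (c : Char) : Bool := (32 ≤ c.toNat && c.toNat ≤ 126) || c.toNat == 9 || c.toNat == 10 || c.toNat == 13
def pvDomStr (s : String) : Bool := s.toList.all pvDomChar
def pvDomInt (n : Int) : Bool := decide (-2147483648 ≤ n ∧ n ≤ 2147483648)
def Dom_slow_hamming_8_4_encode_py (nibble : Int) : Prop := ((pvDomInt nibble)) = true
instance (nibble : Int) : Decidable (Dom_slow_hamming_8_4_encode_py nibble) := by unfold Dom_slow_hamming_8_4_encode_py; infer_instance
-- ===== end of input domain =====

-- B replaces A's per-call bit extraction/parity arithmetic with a precomputed 16-entry codeword table indexed by nibble & 0xF (simpler).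


-- ===== PORT A =====
def slow_hamming_8_4_encode_py (nibble : Int) : Int :=
  -- d = [(nibble >> i) & 1 for i in range(4)][::-1]
  let d := ((PySem.List.pyRange 0 4 1).map (fun i => PySem.Int.band (nibble >>> i.toNat) 1)).reverse
  -- d[0..3]: the list always has length 4, so the indexings never raise; pyGetD is exact here
  let d0 := PySem.List.pyGetD d 0 0
  let d1 := PySem.List.pyGetD d 1 0
  let d2 := PySem.List.pyGetD d 2 0
  let d3 := PySem.List.pyGetD d 3 0
  let p1 := PySem.Int.bxor (PySem.Int.bxor d0 d1) d3
  let p2 := PySem.Int.bxor (PySem.Int.bxor d0 d2) d3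
  let p3 := PySem.Int.bxor (PySem.Int.bxor d1 d2) d3
  let bits := [p1, p2, d0, p3, d1, d2, d3]
  let p0 := PySem.Int.mod bits.sum 2
  PySem.Int.bor (PySem.Int.bor (PySem.Int.bor (PySem.Int.bor (PySem.Int.bor (PySem.Int.bor
    (PySem.Int.bor (p0 <<< (7:Nat)) (p1 <<< (6:Nat))) (p2 <<< (5:Nat))) (d0 <<< (4:Nat)))
    (p3 <<< (3:Nat))) (d1 <<< (2:Nat))) (d2 <<< (1:Nat))) d3

-- ===== PORT B =====
-- precomputed Hamming(8,4) codeword table, _TABLE in Source B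
def pvTable : List Int := [0, 105, 170, 195, 204, 165, 102, 15, 240, 153, 90, 51, 60, 85, 150, 255]

def slow_hamming_8_4_encode_py_alt (nibble : Int) : Int :=
  -- the index nibble & 0xF is always in [0, 16), so the indexing never raises; pyGetD is exact here
  PySem.List.pyGetD pvTable (PySem.Int.band nibble 15) 0

-- ===== PRECONDITION & SPEC =====
def Spec_slow_hamming_8_4_encode_py (nibble : Int) (out : Int) : Prop := out = slow_hamming_8_4_encode_py_alt nibble
instance (nibble : Int) (out : Int) : Decidable (Spec_slow_hamming_8_4_encode_py nibble out) := by unfold Spec_slow_hamming_8_4_encode_py; infer_instance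

-- ===== CLAIM (what is proved, stated in full; the proofs are below) =====
def Claim_equal_slow_hamming_8_4_encode_py : Prop := ∀ (nibble : Int), Dom_slow_hamming_8_4_encode_py nibble → Spec_slow_hamming_8_4_encode_py nibble (slow_hamming_8_4_encode_py nibble)

-- ===== LEMMAS AND PROOFS =====

-- nibble & 15 is nibble mod 16 (Python semantics, all signs)
theorem pv_band15 (n : Int) : PySem.Int.band n 15 = n % 16 := by
  unfold PySem.Int.band
  split_ifs with h1 h2 h2
  · rw [show Int.toNat 15 = 15 from rfl]
    have h : n.toNat &&& 15 = n.toNat % 16 := Nat.and_two_pow_sub_one_eq_mod n.toNat 4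
    omega
  · omega
  · rw [show Int.toNat 15 = 15 from rfl, Nat.and_comm]
    have h : (-n - 1).toNat &&& 15 = (-n - 1).toNat % 16 := Nat.and_two_pow_sub_one_eq_mod (-n - 1).toNat 4
    omega
  · omega

-- each of the four extracted bits depends only on nibble mod 16
theorem pv_bit_mod (n i : Int) (h0 : 0 ≤ i) (h : i < 4) :
    PySem.Int.band (n >>> ((i.toNat : Int))) 1 = PySem.Int.band ((n % 16) >>> ((i.toNat : Int))) 1 := by
  have hk : i.toNat < 4 := by omega
  rw [Int.shiftRight_natCast_right, Int.shiftRight_natCast_right,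
      PySem.Int.band_one, PySem.Int.band_one,
      PySem.Int.mod_eq_emod_of_pos (by norm_num), PySem.Int.mod_eq_emod_of_pos (by norm_num),
      Int.shiftRight_eq_div_pow, Int.shiftRight_eq_div_pow]
  set k := i.toNat with hkdef
  clear_value k
  interval_cases k <;> norm_num <;> omega

theorem pv_range4 : PySem.List.pyRange 0 4 1 = [0, 1, 2, 3] := by decide

-- A's result depends only on nibble mod 16
theorem pv_A_mod (n : Int) :
    slow_hamming_8_4_encode_py n = slow_hamming_8_4_encode_py (n % 16) := by
  unfold slow_hamming_8_4_encode_py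
  rw [pv_range4]
  simp only [List.map, List.reverse, List.reverseAux]
  rw [pv_bit_mod n 0 (by norm_num) (by norm_num), pv_bit_mod n 1 (by norm_num) (by norm_num),
      pv_bit_mod n 2 (by norm_num) (by norm_num), pv_bit_mod n 3 (by norm_num) (by norm_num)]

-- ===== VERDICT (by name: the statement is the Claim_ definition above) =====
theorem slow_hamming_8_4_encode_py_spec : Claim_equal_slow_hamming_8_4_encode_py := by
  intro n _
  unfold Spec_slow_hamming_8_4_encode_py slow_hamming_8_4_encode_py_alt
  rw [pv_band15, pv_A_mod]
  have h0 : 0 ≤ n % 16 := Int.emod_nonneg n (by norm_num)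
  have h1 : n % 16 < 16 := Int.emod_lt_of_pos n (by norm_num)
  set r := n % 16 with hr
  clear_value r
  interval_cases r <;> decide
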